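/- GENERATED by mk_final_copies.py from the proof of the farm's unit `compute_sorted_huffman.3` (farm:compute_sorted_huffman.3.1: Lemmas.lean) as the
   re-elaboration sweep compiled it — do not edit. -/
import Asan.CheckWalk
import Vorbis.Spec.Units.compute_sorted_huffman_3

open X86 X86.User Asan Vorbis Vorbis.Spec Vorbis.Spec.SortedHuffman

set_option maxRecDepth 4000
set_option maxHeartbeats 4000000

namespace Vorbis.Spec.compute_sorted_huffman_3

/-- **Where the blocks of the book are**, as plain arithmetic over the numbers of the ENTRY state (what `u_omega` reads): every
block above the text, inside the data space and off the function's stack `[rsp − 336, rsp + 8)`; the blocks the segment stores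
into (`sorted_values`, sparse: `codeword_lengths`) apart from the ones it reads (`*c`, `lengths`, sparse: `values`). -/
structure Geo (e : State) : Prop where
  se_pos : 1 ≤ (Codebook.sorted_entries e.mem (e.reg .rdi).toNat).toNat
  se_le : (Codebook.sorted_entries e.mem (e.reg .rdi).toNat).toNat ≤ (Codebook.entries e.mem (e.reg .rdi).toNat).toNat
  ent_lt : (Codebook.entries e.mem (e.reg .rdi).toNat).toNat < 16777216
  book : 0x119d40 ≤ (e.reg .rdi).toNat ∧ (e.reg .rdi).toNat + 2120 ≤ 0xC00000 ∧
    ((e.reg .rdi).toNat + 2120 ≤ (e.reg .rsp).toNat - 336 ∨ (e.reg .rsp).toNat + 8 ≤ (e.reg .rdi).toNat)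
  lens : 0x119d40 ≤ (e.reg .rsi).toNat ∧
    (e.reg .rsi).toNat + (Codebook.entries e.mem (e.reg .rdi).toNat).toNat ≤ 0xC00000 ∧
    ((e.reg .rsi).toNat + (Codebook.entries e.mem (e.reg .rdi).toNat).toNat ≤ (e.reg .rsp).toNat - 336 ∨
      (e.reg .rsp).toNat + 8 ≤ (e.reg .rsi).toNat)
  sv : 0x119d40 + 4 ≤ Codebook.sorted_values e.mem (e.reg .rdi).toNat ∧
    Codebook.sorted_values e.mem (e.reg .rdi).toNat +
      4 * (Codebook.sorted_entries e.mem (e.reg .rdi).toNat).toNat ≤ 0xC00000 ∧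
    (Codebook.sorted_values e.mem (e.reg .rdi).toNat +
        4 * (Codebook.sorted_entries e.mem (e.reg .rdi).toNat).toNat ≤ (e.reg .rsp).toNat - 336 ∨
      (e.reg .rsp).toNat + 8 + 4 ≤ Codebook.sorted_values e.mem (e.reg .rdi).toNat)
  book_sv : (e.reg .rdi).toNat + 2120 + 4 ≤ Codebook.sorted_values e.mem (e.reg .rdi).toNat ∨
    Codebook.sorted_values e.mem (e.reg .rdi).toNat +
      4 * (Codebook.sorted_entries e.mem (e.reg .rdi).toNat).toNat ≤ (e.reg .rdi).toNat
  lens_sv : (e.reg .rsi).toNat + (Codebook.entries e.mem (e.reg .rdi).toNat).toNat + 4 ≤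
      Codebook.sorted_values e.mem (e.reg .rdi).toNat ∨
    Codebook.sorted_values e.mem (e.reg .rdi).toNat +
      4 * (Codebook.sorted_entries e.mem (e.reg .rdi).toNat).toNat ≤ (e.reg .rsi).toNat

/-- The off-stack clause of `blk_where`, two-way, for a function that was entered with `rsp = sp`. -/
theorem off_stack {sp a n : Nat} (h1 : 7340032 + 336 ≤ sp) (h2 : sp + 8 ≤ 8388608)
    (h : sp + 8 ≤ a ∨ a + n ≤ 0x700000 ∨ 0x800000 ≤ a) : a + n ≤ sp - 336 ∨ sp + 8 ≤ a := by
  omega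

/-- The geometry of the blocks from the precondition at the entry state. -/
theorem Geo.of_pre {others : List Obj} {frames : List (Nat × FrameLayout)} {Blk : Block → Prop} {e : State}
    (hpre : SortedHuffmanPre others frames Blk e) (h1 : 7340032 + 336 ≤ (e.reg .rsp).toNat)
    (h2 : (e.reg .rsp).toNat + 8 ≤ 8388608) : Geo e := by
  have hL := hpre.live
  have hinv := hpre.shadow.inv
  have hoff := hpre.shadow.offText
  have htop : 0x700000 < (e.reg .rsp).toNat + 8 := by omega
  have k1 := hpre.K1.ent_nonneg
  have k2 := hpre.K1.ent_lt
  have k3 := hpre.se_pos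
  have k4 := hpre.K2.se_le
  have eT : L.textHi = 0x119d40 := rfl
  -- the struct
  obtain ⟨B, hB, hBc⟩ := hpre.book
  simp only [Block.contains, Off.sizeof.Codebook] at hBc
  have wB := blk_where hL hinv hoff htop hB (by omega)
  -- lengths
  have wl := blk_where hL hinv hoff htop hpre.lens (by simp only []; omega)
  simp only [] at wl
  -- sorted_values
  have wv := blk_where hL hinv hoff htop (hpre.K4.sv k3) (by simp only []; omega)
  simp only [] at wv
  -- disjointness
  have hbs : (Codebook.block (e.reg .rdi).toNat).disjoint (Codebook.svBlock e.mem (e.reg .rdi).toNat) ∧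
      (Block.mk (e.reg .rsi).toNat (Codebook.entries e.mem (e.reg .rdi).toNat).toNat).disjoint
        (Codebook.svBlock e.mem (e.reg .rdi).toNat) := by
    by_cases hs : Codebook.sparse e.mem (e.reg .rdi).toNat = 0
    · have ha := hpre.apartDense hs
      simp only [Apart, List.pairwise_cons, List.mem_cons, forall_eq_or_imp] at ha
      refine ⟨ha.1.2.2.2.1, ?_⟩
      have hcl : clBlock e.mem (e.reg .rdi).toNat =
          Block.mk (e.reg .rsi).toNat (Codebook.entries e.mem (e.reg .rdi).toNat).toNat := by
        unfold Codebook.clBlock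
        rw [Codebook.N_dense hs, (hpre.dense hs).1]
      rw [← hcl]
      exact ha.2.1.2.2.1
    · have ha := hpre.apartSparse hs
      simp only [Apart, List.pairwise_cons, List.mem_cons, forall_eq_or_imp] at ha
      exact ⟨ha.1.2.2.2.1, (ha.2.2.2.2.1.1).symm⟩
  obtain ⟨hd1, hd2⟩ := hbs
  simp only [Block.disjoint, Off.sizeof.Codebook] at hd1 hd2
  have o1 := off_stack (n := B.size) h1 h2 wB.2.2
  have o2 := off_stack h1 h2 wl.2.2
  have o3 := off_stack h1 h2 wv.2.2
  refine ⟨by omega, by omega, by omega, ?_, ?_, ?_, ?_, ?_⟩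
  · omega
  · omega
  · omega
  · omega
  · omega

/-- The geometry of the two blocks only a sparse book has: `codeword_lengths` (`se` bytes, stored to) and `values` (`4·se` bytes,
read). -/
structure GeoS (e : State) : Prop where
  cl : 0x119d40 ≤ Codebook.codeword_lengths e.mem (e.reg .rdi).toNat ∧
    Codebook.codeword_lengths e.mem (e.reg .rdi).toNat +
      (Codebook.sorted_entries e.mem (e.reg .rdi).toNat).toNat ≤ 0xC00000 ∧
    (Codebook.codeword_lengths e.mem (e.reg .rdi).toNat +
        (Codebook.sorted_entries e.mem (e.reg .rdi).toNat).toNat ≤ (e.reg .rsp).toNat - 336 ∨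
      (e.reg .rsp).toNat + 8 ≤ Codebook.codeword_lengths e.mem (e.reg .rdi).toNat)
  vals : 0x119d40 ≤ (e.reg .rdx).toNat ∧
    (e.reg .rdx).toNat + 4 * (Codebook.sorted_entries e.mem (e.reg .rdi).toNat).toNat ≤ 0xC00000 ∧
    ((e.reg .rdx).toNat + 4 * (Codebook.sorted_entries e.mem (e.reg .rdi).toNat).toNat ≤ (e.reg .rsp).toNat - 336 ∨
      (e.reg .rsp).toNat + 8 ≤ (e.reg .rdx).toNat)
  book_cl : (e.reg .rdi).toNat + 2120 ≤ Codebook.codeword_lengths e.mem (e.reg .rdi).toNat ∨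
    Codebook.codeword_lengths e.mem (e.reg .rdi).toNat +
      (Codebook.sorted_entries e.mem (e.reg .rdi).toNat).toNat ≤ (e.reg .rdi).toNat
  lens_cl : (e.reg .rsi).toNat + (Codebook.entries e.mem (e.reg .rdi).toNat).toNat ≤
      Codebook.codeword_lengths e.mem (e.reg .rdi).toNat ∨
    Codebook.codeword_lengths e.mem (e.reg .rdi).toNat +
      (Codebook.sorted_entries e.mem (e.reg .rdi).toNat).toNat ≤ (e.reg .rsi).toNat
  vals_cl : (e.reg .rdx).toNat + 4 * (Codebook.sorted_entries e.mem (e.reg .rdi).toNat).toNat ≤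
      Codebook.codeword_lengths e.mem (e.reg .rdi).toNat ∨
    Codebook.codeword_lengths e.mem (e.reg .rdi).toNat +
      (Codebook.sorted_entries e.mem (e.reg .rdi).toNat).toNat ≤ (e.reg .rdx).toNat
  sv_cl : Codebook.sorted_values e.mem (e.reg .rdi).toNat +
      4 * (Codebook.sorted_entries e.mem (e.reg .rdi).toNat).toNat ≤
      Codebook.codeword_lengths e.mem (e.reg .rdi).toNat ∨
    Codebook.codeword_lengths e.mem (e.reg .rdi).toNat +
      (Codebook.sorted_entries e.mem (e.reg .rdi).toNat).toNat + 4 ≤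
      Codebook.sorted_values e.mem (e.reg .rdi).toNat
  vals_sv : (e.reg .rdx).toNat + 4 * (Codebook.sorted_entries e.mem (e.reg .rdi).toNat).toNat + 4 ≤
      Codebook.sorted_values e.mem (e.reg .rdi).toNat ∨
    Codebook.sorted_values e.mem (e.reg .rdi).toNat +
      4 * (Codebook.sorted_entries e.mem (e.reg .rdi).toNat).toNat ≤ (e.reg .rdx).toNat

/-- The geometry of a sparse book's extra blocks from the precondition at the entry state. -/
theorem GeoS.of_pre {others : List Obj} {frames : List (Nat × FrameLayout)} {Blk : Block → Prop} {e : State}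
    (hpre : SortedHuffmanPre others frames Blk e) (h1 : 7340032 + 336 ≤ (e.reg .rsp).toNat)
    (h2 : (e.reg .rsp).toNat + 8 ≤ 8388608) (hs : Codebook.sparse e.mem (e.reg .rdi).toNat ≠ 0) : GeoS e := by
  have hL := hpre.live
  have hinv := hpre.shadow.inv
  have hoff := hpre.shadow.offText
  have htop : 0x700000 < (e.reg .rsp).toNat + 8 := by omega
  have k1 := hpre.K1.ent_nonneg
  have k2 := hpre.K1.ent_lt
  have k3 := hpre.se_pos
  have k4 := hpre.K2.se_le
  have eT : L.textHi = 0x119d40 := rfl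
  have hs1 := hpre.K2.sparse_one hs
  have wc := blk_where hL hinv hoff htop (hpre.K3t.sparse_lengths hs1) (by simp only []; omega)
  simp only [] at wc
  have wv := blk_where hL hinv hoff htop (hpre.sparse hs).1 (by simp only []; omega)
  simp only [] at wv
  have ha := hpre.apartSparse hs
  have hcl : clBlock e.mem (e.reg .rdi).toNat =
      Block.mk (Codebook.codeword_lengths e.mem (e.reg .rdi).toNat)
        (Codebook.sorted_entries e.mem (e.reg .rdi).toNat).toNat := by
    unfold Codebook.clBlock
    rw [Codebook.N_sparse hs]
  rw [hcl] at ha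
  simp only [Apart, List.pairwise_cons, List.mem_cons, forall_eq_or_imp, Block.disjoint, Off.sizeof.Codebook,
    List.not_mem_nil, false_imp_iff, implies_true, and_true, List.Pairwise.nil] at ha
  have o1 := off_stack h1 h2 wc.2.2
  have o2 := off_stack h1 h2 wv.2.2
  obtain ⟨⟨a1, a2, a3, a4, a5, a6⟩, ⟨b2, b3, b4, b5, b6⟩, ⟨c3, c4, c5, c6⟩, ⟨d4, d5, d6⟩, ⟨e5, e6⟩, f6⟩ := ha
  refine ⟨⟨by omega, by omega, o1⟩, ⟨by omega, by omega, o2⟩, ?_, ?_, ?_, ?_, ?_⟩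
  · omega
  · omega
  · omega
  · omega
  · omega

/-- Composition of "every field reads the same". -/
theorem sameFields_trans {m1 m2 m3 : Mem} {c : Nat} (h1 : Codebook.SameFields m1 m2 c)
    (h2 : Codebook.SameFields m2 m3 c) : Codebook.SameFields m1 m3 c := by
  constructor
  · exact h2.dimensions.trans h1.dimensions
  · exact h2.entries.trans h1.entries
  · exact h2.codeword_lengths.trans h1.codeword_lengths
  · exact h2.minimum_value.trans h1.minimum_value
  · exact h2.delta_value.trans h1.delta_value
  · exact h2.value_bits.trans h1.value_bits
  · exact h2.lookup_type.trans h1.lookup_type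
  · exact h2.sequence_p.trans h1.sequence_p
  · exact h2.sparse.trans h1.sparse
  · exact h2.lookup_values.trans h1.lookup_values
  · exact h2.multiplicands.trans h1.multiplicands
  · exact h2.codewords.trans h1.codewords
  · intro k hk
    exact (h2.fast_huffman k hk).trans (h1.fast_huffman k hk)
  · exact h2.sorted_codewords.trans h1.sorted_codewords
  · exact h2.sorted_values.trans h1.sorted_values
  · exact h2.sorted_entries.trans h1.sorted_entries

/-- Frame of K3t: it reads fields of the struct only. -/
theorem k3t_frame {Blk : Block → Prop} {mem mem' : Mem} {c : Nat} (h : Codebook.K3t Blk mem c)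
    (e : Codebook.SameFields mem mem' c) : Codebook.K3t Blk mem' c := by
  refine ⟨?_, ?_, ?_⟩
  · intro hs
    rw [e.sparse] at hs
    have k := h.dense hs
    refine ⟨?_, ?_⟩
    · rw [e.codeword_lengths, e.entries]
      exact k.lengths
    · rw [e.codewords, e.entries]
      exact k.codewords
  · intro hs
    rw [e.sparse] at hs
    rw [e.codeword_lengths, e.sorted_entries]
    exact h.sparse_lengths hs
  · intro hs
    rw [e.sparse] at hs
    rw [e.codewords, e.sorted_entries]
    exact h.sparse_codewords hs

/-- **Where the segment stores**: a window inside the dead part of the function's stack (`[rsp − 336, rsp − 48)`: the locals and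
the callees' frames; the saved registers and the return address are above), inside the table `sorted_values[0 .. se)`, or —
sparse — inside `codeword_lengths[0 .. se)`. -/
def Allowed (e : State) (w : Span) : Prop :=
  ((e.reg .rsp).toNat - 336 ≤ w.lo ∧ w.hi ≤ (e.reg .rsp).toNat - 48) ∨
  (Codebook.sorted_values e.mem (e.reg .rdi).toNat ≤ w.lo ∧
    w.hi ≤ Codebook.sorted_values e.mem (e.reg .rdi).toNat +
      4 * (Codebook.sorted_entries e.mem (e.reg .rdi).toNat).toNat) ∨
  (Codebook.sparse e.mem (e.reg .rdi).toNat ≠ 0 ∧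
    Codebook.codeword_lengths e.mem (e.reg .rdi).toNat ≤ w.lo ∧
    w.hi ≤ Codebook.codeword_lengths e.mem (e.reg .rdi).toNat +
      (Codebook.sorted_entries e.mem (e.reg .rdi).toNat).toNat)

/-- A range that is off the dead stack, off the `sorted_values` table and (sparse) off `codeword_lengths` misses every window
the segment stores into. -/
theorem off_allowed {e : State} {ws : List Span} (hws : ∀ w, w ∈ ws → Allowed e w) {lo hi : Nat}
    (h1 : hi ≤ (e.reg .rsp).toNat - 336 ∨ (e.reg .rsp).toNat - 48 ≤ lo)
    (h2 : hi ≤ Codebook.sorted_values e.mem (e.reg .rdi).toNat ∨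
      Codebook.sorted_values e.mem (e.reg .rdi).toNat +
        4 * (Codebook.sorted_entries e.mem (e.reg .rdi).toNat).toNat ≤ lo)
    (h3 : Codebook.sparse e.mem (e.reg .rdi).toNat ≠ 0 →
      (hi ≤ Codebook.codeword_lengths e.mem (e.reg .rdi).toNat ∨
        Codebook.codeword_lengths e.mem (e.reg .rdi).toNat +
          (Codebook.sorted_entries e.mem (e.reg .rdi).toNat).toNat ≤ lo)) :
    ∀ w, w ∈ ws → hi ≤ w.lo ∨ w.hi ≤ lo := by
  intro w hw
  rcases hws w hw with h | h | h
  · omega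
  · omega
  · have := h3 h.1
    omega

/-- **The frame step of the segment**: the facts every cut point shares (`Common`) hold again after stores into the dead stack,
the `sorted_values` table and (sparse) `codeword_lengths` (`hws`), once ZV is shown for the new memory and the two spilled
arguments are read back. -/
theorem common_step {others : List Obj} {frames : List (Nat × FrameLayout)} {Blk : Block → Prop} {u₀ : State} {ret : Word}
    {e v v' : State} {ws : List Span} (hcom : Common others frames Blk u₀ ret e v)
    (hst : Mem.SameExcept ws v.mem v'.mem) (hws : ∀ w, w ∈ ws → Allowed e w)
    (hrsp : v'.reg .rsp = e.reg .rsp - 104) (hrbp : v'.reg .rbp = e.reg .rdi)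
    (hcode : CodeOK u₀ v'.mem) (habi : abiInv v')
    (hlens : UInt64.ofNat (v'.mem.readLE (e.reg .rsp - 88) 8) = e.reg .rsi)
    (hvals : UInt64.ofNat (v'.mem.readLE (e.reg .rsp - 72) 8) = e.reg .rdx)
    (hzv : ZV v'.mem (Codebook.sorted_values e.mem (e.reg .rdi).toNat)
      (Codebook.sorted_entries e.mem (e.reg .rdi).toNat).toNat (Codebook.entries e.mem (e.reg .rdi).toNat)) :
    Common others frames Blk u₀ ret e v' := by
  obtain ⟨hmid, hpre, hc, _, _, hfields, hK1, hK2, hK3t, hK4, _, hval, hlk⟩ := hcom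
  obtain ⟨he, _, hra, h15, h14, h13, h12, hbp, hbx, hsame, _, _, hun⟩ := hmid
  have he0 := he
  have he_room := he.room
  have he_top := he.top
  simp only [vspec, Vorbis.conv_stackLo, Vorbis.conv_stackHi] at he_room he_top
  have g := Geo.of_pre hpre he_room he_top
  have gs := fun hs => GeoS.of_pre hpre he_room he_top hs
  obtain ⟨g1, g2, g3, gbook, glens, gsv, gbsv, glsv⟩ := g
  -- a stack slot above the dead part reads the same
  have slot : ∀ k : Nat, k ≤ 48 → v'.mem.readLE (e.reg .rsp - UInt64.ofNat k) 8 = v.mem.readLE (e.reg .rsp - UInt64.ofNat k) 8 := by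
    intro k hk
    have ek : (e.reg .rsp - UInt64.ofNat k).toNat = (e.reg .rsp).toNat - k := by u_omega
    apply hst.readLE _ 8 (by omega)
    rw [ek]
    apply off_allowed hws
    · omega
    · omega
    · intro hs
      have := (gs hs).cl
      omega
  -- the struct reads the same
  have hbookK : (Codebook.block (e.reg .rdi).toNat).Kept v.mem v'.mem := by
    apply Block.Kept.of_sameExcept hst
    · simp only [Off.sizeof.Codebook]
      apply off_allowed hws
      · omega
      · omega
      · intro hs
        have := (gs hs).book_cl
        omega
    · simp only [Off.sizeof.Codebook]
      omega
  have hf' := Codebook.SameFields.of_kept hbookK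
  have hsw : Mem.EqOn (Codebook.sorted_values e.mem (e.reg .rdi).toNat - 4)
      (Codebook.sorted_values e.mem (e.reg .rdi).toNat) v.mem v'.mem := by
    apply hst.eqOn
    apply off_allowed hws
    · omega
    · omega
    · intro hs
      have := (gs hs).sv_cl
      omega
  refine ⟨⟨he0, hrsp, ?_, ?_, ?_, ?_, ?_, ?_, ?_, ?_, hcode, habi, ?_⟩, hpre, hrbp, hlens, hvals,
    sameFields_trans hfields hf', hK1.frame hf', hK2.frame hf', k3t_frame hK3t hf', ?_, hzv, ?_, ?_⟩
  · have := slot 0 (by omega)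
    simp only [UInt64.reduceOfNat, UInt64.sub_zero] at this
    rw [this]
    exact hra
  · have := slot 8 (by omega)
    simp only [UInt64.reduceOfNat] at this
    rw [this]
    exact h15
  · have := slot 16 (by omega)
    simp only [UInt64.reduceOfNat] at this
    rw [this]
    exact h14
  · have := slot 24 (by omega)
    simp only [UInt64.reduceOfNat] at this
    rw [this]
    exact h13
  · have := slot 32 (by omega)
    simp only [UInt64.reduceOfNat] at this
    rw [this]
    exact h12
  · have := slot 40 (by omega)
    simp only [UInt64.reduceOfNat] at this
    rw [this]
    exact hbp
  · have := slot 48 (by omega)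
    simp only [UInt64.reduceOfNat] at this
    rw [this]
    exact hbx
  · -- the footprint
    apply hsame.step_same hst
    intro w hw a ha1 ha2
    simp only [X86.User.Spec.footprint, vspec, compute_sorted_huffman.wins, List.mem_cons, List.mem_append]
    rcases hws w hw with h | h | h
    · refine ⟨_, Or.inl rfl, ?_, ?_⟩
      · simp only []
        omega
      · simp only []
        omega
    · refine ⟨_, Or.inr (Or.inl (Or.inr (Or.inl rfl))), ?_, ?_⟩
      · simp only []
        omega
      · simp only []
        omega
    · refine ⟨(clBlock e.mem (e.reg .rdi).toNat).span, Or.inr (Or.inr ?_), ?_, ?_⟩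
      · rw [if_neg h.1]
        exact List.mem_singleton.mpr rfl
      · show Codebook.codeword_lengths e.mem (e.reg .rdi).toNat ≤ a
        omega
      · show a < Codebook.codeword_lengths e.mem (e.reg .rdi).toNat + (Codebook.N e.mem (e.reg .rdi).toNat).toNat
        rw [Codebook.N_sparse h.1]
        omega
  · -- the shadow
    apply hun.trans
    apply hst.eqOn
    apply off_allowed hws
    · omega
    · omega
    · intro hs
      have := (gs hs).cl
      omega
  · -- K4: the sentinel word
    apply hK4.frame hf'
    intro _
    rw [hfields.sorted_values]
    exact hsw.i32 _ (by omega) (by omega) (by omega)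
  · -- VAL
    intro hs
    obtain ⟨q1, q2, q3, q4, q5, q6, q7⟩ := gs hs
    apply (hval hs).same
    · apply hst.eqOn
      apply off_allowed hws
      · omega
      · omega
      · intro _
        omega
    · omega
  · -- lengths
    apply hlk.trans
    apply Block.Kept.of_sameExcept hst
    · apply off_allowed hws
      · simp only []
        omega
      · simp only []
        omega
      · intro hs
        have := (gs hs).lens_cl
        simp only []
        omega
    · simp only []
      omega

/-- **The invariant of loop 1233 at its head `cut9` (10B3F8H)**: `AtLoop` with a general counter `i ≤ len` in `[rsp+0CH]`. -/
structure Inv (others : List Obj) (frames : List (Nat × FrameLayout)) (Blk : Block → Prop) (u₀ : State) (ret : Word)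
    (e : State) (i : Nat) (v : State) : Prop where
  rip : v.rip = L.compute_sorted_huffman.cut9
  common : Common others frames Blk u₀ ret e v
  /-- `[rsp+18H]` = len -/
  len : v.mem.readLE (e.reg .rsp - 80) 4 = (Codebook.N e.mem (e.reg .rdi).toNat).toNat
  /-- `[rsp+0CH]` = i -/
  cnt : v.mem.readLE (e.reg .rsp - 92) 4 = i
  cnt_le : (i : Int) ≤ Codebook.N e.mem (e.reg .rdi).toNat

/-- **The invariant of the binary search 1238 at its head `cut11` (10B47DH)**, in round `i` of loop 1233: BS (`x` = r15d,
`n` = r12d, `1 ≤ n`, `x + n ≤ se`), the counter `i < len`, the sparse byte in `[rsp+1EH]` and `4·i` in `[rsp+28H]`. -/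
structure Search (others : List Obj) (frames : List (Nat × FrameLayout)) (Blk : Block → Prop) (u₀ : State) (ret : Word)
    (e : State) (i x n : Nat) (v : State) : Prop where
  rip : v.rip = L.compute_sorted_huffman.cut11
  common : Common others frames Blk u₀ ret e v
  len : v.mem.readLE (e.reg .rsp - 80) 4 = (Codebook.N e.mem (e.reg .rdi).toNat).toNat
  cnt : v.mem.readLE (e.reg .rsp - 92) 4 = i
  cnt_lt : (i : Int) < Codebook.N e.mem (e.reg .rdi).toNat
  /-- `[rsp+1EH]` = the byte `c->sparse` -/
  spb : v.mem.readLE (e.reg .rsp - 74) 1 = Codebook.sparse e.mem (e.reg .rdi).toNat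
  /-- `[rsp+28H]` = 4·i -/
  off : v.mem.readLE (e.reg .rsp - 64) 8 = 4 * i
  /-- r12d = n -/
  r12 : v.reg .r12 = Word.ofBV (BitVec.ofNat 32 n)
  /-- r15d = x -/
  r15 : v.reg .r15 = Word.ofBV (BitVec.ofNat 32 x)
  n_pos : 1 ≤ n
  bs : x + n ≤ (Codebook.sorted_entries e.mem (e.reg .rdi).toNat).toNat

/-- The next round of loop 1233: the invariant for `i + 1`, and `i < len` (the measure `len − i` went down). -/
def Next (others : List Obj) (frames : List (Nat × FrameLayout)) (Blk : Block → Prop) (u₀ : State) (ret : Word)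
    (e : State) (i : Nat) (v : State) : Prop :=
  Inv others frames Blk u₀ ret e (i + 1) v ∧ (i : Int) < Codebook.N e.mem (e.reg .rdi).toNat

/-- `movsxd r, [i] ; shl r, 2 ; add r, [ptr]`: the address of word `i` of the array at `p`. -/
theorem sext_shl2_add (i p : Nat) (h : i < 2 ^ 31) (hp : p + 4 * i < 2 ^ 64) :
    (Word.ofBV (BitVec.signExtend 64 (BitVec.ofNat 32 i)) <<< 2 + UInt64.ofNat p).toNat = p + 4 * i := by
  have hi : (UInt64.ofNat i).toNat = i := by
    rw [UInt64.toNat_ofNat']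
    omega
  have e := sext32_shl2_add (UInt64.ofNat i) p (by rw [hi]; omega) (by rw [hi]; omega)
  have e1 : Word.part .w32 (UInt64.ofNat i) = BitVec.ofNat 32 i := by
    apply BitVec.eq_of_toNat_eq
    rw [part32_toNat, hi, BitVec.toNat_ofNat]
  rw [e1, hi] at e
  rw [e]
  omega

/-- `movsxd r, [i] ; shl r, 2`: the byte offset of word `i`. -/
theorem sext_shl2 (i : Nat) (h : i < 2 ^ 31) :
    (Word.ofBV (BitVec.signExtend 64 (BitVec.ofNat 32 i)) <<< 2).toNat = 4 * i := by
  have e := sext_shl2_add i 0 h (by omega)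
  have z : (UInt64.ofNat 0 : Word) = 0 := rfl
  rw [z, UInt64.add_zero] at e
  omega

/-- `add dword [i], 1` of a small counter. -/
theorem inc_small (i : Nat) (h : i < 2 ^ 31) : (BitVec.ofNat 32 i + 1#32).toNat = i + 1 := by
  rw [BitVec.toNat_add, BitVec.toNat_ofNat]
  have : (1#32).toNat = 1 := by decide
  rw [this]
  omega

/-- `movsxd` of a small counter. -/
theorem sext_small (i : Nat) (h : i < 2 ^ 31) : (Word.ofBV (BitVec.signExtend 64 (BitVec.ofNat 32 i))).toNat = i := by
  rw [toNat_sext32 _ (by rw [toNat_ofNat32 i (by omega)]; exact h), toNat_ofNat32 i (by omega)]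

/-- The low half of a register that holds a zero-extended 32-bit value. -/
theorem part32_ofBV (b : BitVec 32) : Word.part .w32 (Word.ofBV b) = b := by
  apply BitVec.eq_of_toNat_eq
  rw [part32_toNat, toNat_ofBV32]
  have := b.isLt
  omega

/-- `sar r32, 1` of a non-negative `int`: `n >> 1`. -/
theorem sar1_small (n : Nat) (h : n < 2 ^ 31) : (BitVec.ofNat 32 n).sshiftRight 1 = BitVec.ofNat 32 (n / 2) := by
  apply BitVec.eq_of_toNat_eq
  have hm : (BitVec.ofNat 32 n).msb = false := by
    rw [BitVec.msb_eq_decide, toNat_ofNat32 n (by omega)]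
    simp only [decide_eq_false_iff_not, Nat.not_le]
    omega
  rw [BitVec.toNat_sshiftRight_of_msb_false hm, toNat_ofNat32 n (by omega), toNat_ofNat32 (n / 2) (by omega)]
  simp only [Nat.shiftRight_eq_div_pow, Nat.pow_one]

/-- `lea r32, [r13 + r15]`: `m = x + (n >> 1)`, no wrap. -/
theorem lea_small (a b : Nat) (h : a + b < 2 ^ 31) :
    BitVec.setWidth 32 (Word.ofBV (BitVec.ofNat 32 a) + Word.ofBV (BitVec.ofNat 32 b)).toBitVec = BitVec.ofNat 32 (a + b) := by
  apply BitVec.eq_of_toNat_eq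
  rw [BitVec.toNat_setWidth, UInt64.toNat_toBitVec, UInt64.toNat_add, toNat_ofBV32, toNat_ofBV32,
    toNat_ofNat32 a (by omega), toNat_ofNat32 b (by omega), toNat_ofNat32 (a + b) (by omega)]
  omega

/-- `sub r12d, r13d`: `n − (n >> 1)`. -/
theorem sub_small (n : Nat) (h : n < 2 ^ 31) :
    BitVec.ofNat 32 n - BitVec.ofNat 32 (n / 2) = BitVec.ofNat 32 (n - n / 2) := by
  apply BitVec.eq_of_toNat_eq
  rw [toNat_sub32 n (n / 2) (by omega) (by omega), toNat_ofNat32 (n - n / 2) (by omega)]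


/-- **Loop 1233, a dense book, from the head `cut9` (10B3F8H) to the next cut** (C lines 1233 – 1237): `i ≥ len` → the epilogue
`cut12` (`AtEpilogue`); else `huff_len = lengths[i]` (check 10B3D6H, `i < entries`), `include_in_sort` (10B3EAH); not included →
`++i` and the head again (`Next`); included → `code = bit_reverse(c->codewords[i])` (checks 10B443H, 10B460H; call 10B467H),
`n = c->sorted_entries`, `x = 0` → the head of the binary search `cut11` (`Search i 0 se`). -/
theorem headDense {Lay : Layout} (hLay : Lay.hi = 0x1000000) {μ : Microarch} (hμ : UserX.MicroOK μ) {u₀ : State}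
    (hcode : HasCodeNat Lay u₀ Vorbis.L.compute_sorted_huffman.entry Vorbis.Code.code_compute_sorted_huffman.nat Vorbis.L.compute_sorted_huffman.size)
    (h_load1 : Asan.SmallCheck Lay μ Vorbis.WayInv (Vorbis.CodeOK u₀) [.rax, .rdx] 1 Vorbis.L.__asan_load1_noabort.entry)
    (h_load4 : Asan.SmallCheck Lay μ Vorbis.WayInv (Vorbis.CodeOK u₀) [.rax, .rcx, .rdx] 4 Vorbis.L.__asan_load4_noabort.entry)
    (h_load8 : Asan.SmallCheck Lay μ Vorbis.WayInv (Vorbis.CodeOK u₀) [.rax, .rcx, .rdx] 8 Vorbis.L.__asan_load8_noabort.entry)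
    {others : List Obj} {frames : List (Nat × FrameLayout)} {Blk : Block → Prop} {ret : Word} {e v : State} {i : Nat}
    (h_iis : Calls Lay μ Vorbis.WayInv (Vorbis.conv u₀) Vorbis.L.include_in_sort.entry (Vorbis.Spec.include_in_sort.spec others frames))
    (h_br : Calls Lay μ Vorbis.WayInv (Vorbis.conv u₀) Vorbis.L.bit_reverse.entry (Vorbis.Spec.bit_reverse.spec others frames))
    (hinv : Inv others frames Blk u₀ ret e i v) (hs : Codebook.sparse e.mem (e.reg .rdi).toNat = 0) :
    ReachVia Lay μ WayInv v (fun v' => AtEpilogue others frames Blk u₀ ret e v' ∨ Next others frames Blk u₀ ret e i v' ∨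
      Search others frames Blk u₀ ret e i 0 (Codebook.sorted_entries e.mem (e.reg .rdi).toNat).toNat v') := by
  obtain ⟨hrip, hcom, hlen, hi, hile⟩ := hinv
  have hcom0 := hcom
  obtain ⟨hmid, hpre, hc, hlens, hvals, hfields, hK1, hK2, hK3t, hK4, hzv, hval, hlk⟩ := hcom
  have hmid0 := hmid
  obtain ⟨he, hrsp, hra, h15, h14, h13, h12, hbp, hbx, hsame, hcodeok, habi, hun⟩ := hmid
  v_entry he
  obtain ⟨g1, g2, g3, gbook, glens, gsv, gbsv, glsv⟩ := Geo.of_pre hpre he_room he_top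
  have hN : Codebook.N e.mem (e.reg .rdi).toNat = Codebook.entries e.mem (e.reg .rdi).toNat := Codebook.N_dense hs
  rw [hN] at hlen hile
  have k1 := hpre.K1.ent_nonneg
  have hiE : i ≤ (Codebook.entries e.mem (e.reg .rdi).toNat).toNat := by omega
  have hsx := sext_small i (by omega)
  have r27 : v.mem.readLE (e.reg .rdi + 27) 1 = 0 := by
    have := hfields.sparse
    rw [hs] at this
    exact (readLE_field v.mem (e.reg .rdi) 27 1).trans this
  have w_rip := hrip
  have w_rsp := hrsp
  have w_rbp := hc
  have w_eq : Mem.EqOn Vorbis.L.textLo Vorbis.L.textHi u₀.mem v.mem := hcodeok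
  have hdf : v.flags .df = false := habi.1
  have hmx : v.mxcsr &&& 0x1F80 = 0x1F80 := habi.2
  have hsse := Vorbis.sseOK_of_abiInv habi
  have hEi : (BitVec.ofNat 32 (Codebook.entries e.mem (e.reg .rdi).toNat).toNat).toInt =
      ((Codebook.entries e.mem (e.reg .rdi).toNat).toNat : Int) := by
    rw [toInt_of_lt _ (by rw [toNat_ofNat32 _ (by omega)]; omega), toNat_ofNat32 _ (by omega)]
  have hii : (BitVec.ofNat 32 i).toInt = (i : Int) := by
    rw [toInt_of_lt _ (by rw [toNat_ofNat32 _ (by omega)]; omega), toNat_ofNat32 _ (by omega)]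
  have r40 : v.mem.readLE (e.reg .rdi + 40) 8 = Codebook.codewords e.mem (e.reg .rdi).toNat :=
    (readLE_field v.mem (e.reg .rdi) 40 8).trans hfields.codewords
  have hse32 : v.mem.readLE (e.reg .rdi + 2112) 4 = (Codebook.sorted_entries e.mem (e.reg .rdi).toNat).toNat := by
    have h1 := hfields.sorted_entries
    have h0 : 0 ≤ v.mem.i32 ((e.reg .rdi).toNat + 2112) := by
      show 0 ≤ Codebook.sorted_entries v.mem (e.reg .rdi).toNat
      rw [h1]
      have := hpre.se_pos
      omega
    have h2 := Mem.u32_of_i32_nonneg v.mem ((e.reg .rdi).toNat + 2112) h0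
    exact (readLE_field v.mem (e.reg .rdi) 2112 4).trans (h2.trans (congrArg Int.toNat h1))
  clear hK1 hK2 hK3t hK4 hval hlk hra h15 h14 h13 h12 hbp hbx hsame hmid0 gbsv glsv
  u_walk hcode [hμ.vendor] until [Vorbis.L.compute_sorted_huffman.cut9, Vorbis.L.compute_sorted_huffman.cut11, Vorbis.L.compute_sorted_huffman.cut12] span [Vorbis.L.textLo, Vorbis.L.textHi] side (v_side)
  case check_10b3d6 =>
    -- 10B3D6H: L1 `lengths + i`, `i < entries`: inside the `lengths` block
    have hu1 : ShadowUntouched v.mem s_10b3d6.mem := by v_untouched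
    have hun' : ShadowUntouched e.mem s_10b3d6.mem := hun.trans hu1
    rw [hEi, hii] at hbr_10b400
    have hsite : Site (Live (stackObjs frames ++ others)) ((e.reg .rsi).toNat + i) 1 :=
      Site.of_blk hpre.live hpre.lens (by simp only []; omega) (by simp only []; omega) (by omega)
    exact check_site hpre.shadow.inv hun' hsite (by u_omega)
  case call_inv => v_inv
  case pre_10b3ea =>
    -- include_in_sort's precondition: the shadow layer at its entry, `*c` inside one live object
    have hu1 : ShadowUntouched v.mem s_10b3ea.mem := by v_untouched
    have hun' : ShadowUntouched e.mem s_10b3ea.mem := hun.trans hu1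
    refine ⟨hpre.shadow.call hun' (by u_omega) (by u_omega) (by u_omega), ?_⟩
    rw [w_rdi]
    exact hpre.bookLive
  · -- 10B400H taken: `i ≥ len`, the exit to the epilogue (cut12)
    have hst : Mem.SameExcept [] v.mem s_10b400.mem := by
      rw [w_mem]
      exact Mem.SameExcept.refl _ _
    have hc' := common_step hcom0 hst (fun w hw => absurd hw (List.not_mem_nil)) (by rw [w_kept .rsp rfl]; exact hrsp)
      (by rw [w_kept .rbp rfl]; exact hc) w_eq (by v_inv) (by rw [w_mem]; exact hlens) (by rw [w_mem]; exact hvals)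
      (by rw [w_mem]; exact hzv)
    exact ReachVia.done (Or.inl ⟨w_rip, hc'.mid, hc'.zv⟩)
  · -- 10B3EFH: include_in_sort has returned
    v_after_call w_rsp_10b3ea w_mem_10b3ea
    have c1 : s_10b3ear.mem.readLE (e.reg .rsp - 92) 4 = i := by u_frame hi
    have c2 : s_10b3ear.mem.readLE (e.reg .rdi + 40) 8 = Codebook.codewords e.mem (e.reg .rdi).toNat := by u_frame r40
    have c3 : s_10b3ear.mem.readLE (e.reg .rdi + 2112) 4 = (Codebook.sorted_entries e.mem (e.reg .rdi).toNat).toNat := by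
      u_frame hse32
    have c4 : UInt64.ofNat (s_10b3ear.mem.readLE (e.reg .rsp - 88) 8) = e.reg .rsi := by u_frame hlens
    have c5 : UInt64.ofNat (s_10b3ear.mem.readLE (e.reg .rsp - 72) 8) = e.reg .rdx := by u_frame hvals
    have c6 : s_10b3ear.mem.readLE (e.reg .rsp - 80) 4 = (Codebook.entries e.mem (e.reg .rdi).toNat).toNat := by
      u_frame hlen
    have c7 : s_10b3ear.mem.readLE (e.reg .rsp - 74) 1 = 0 := by
      have h0 : ((((v.mem.writeLE (e.reg Reg.rsp - 74) 1 0).writeLE (e.reg Reg.rsp - 112) 8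
          (UInt64.toNat (L.compute_sorted_huffman.cut9 - 29))).writeLE (e.reg Reg.rsp - 73) 1
          (BitVec.setWidth 8 (BitVec.zeroExtend 32 (BitVec.ofNat 8
            (v.mem.readLE (Word.ofBV (BitVec.signExtend 64 (BitVec.ofNat 32 i)) + e.reg Reg.rsi) 1)))).toNat).writeLE
          (e.reg Reg.rsp - 112) 8 1094639).readLE (e.reg .rsp - 74) 1 = 0 := by
        u_read
      exact Mem.readLE_frame (ν := s_10b3ear.mem) h0 (by u_eqon) (by u_omega)
    have hsame1 : Mem.SameExcept [⟨(e.reg .rsp).toNat - 336, (e.reg .rsp).toNat - 48⟩] v.mem s_10b3ear.mem := by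
      u_same
    have hu1 : ShadowUntouched v.mem s_10b3ear.mem := by v_untouched
    obtain ⟨z, w_rax⟩ : ∃ z, s_10b3ear.reg .rax = z := ⟨_, rfl⟩
    clear w_same w_post
    u_walk hcode [hμ.vendor] until [Vorbis.L.compute_sorted_huffman.cut9, Vorbis.L.compute_sorted_huffman.cut11, Vorbis.L.compute_sorted_huffman.cut12] span [Vorbis.L.textLo, Vorbis.L.textHi] side (v_side)
    case check_10b443 =>
      -- 10B443H: L8 `c + 28H`, a field of the struct
      have hu2 : ShadowUntouched v.mem s_10b443.mem := by v_untouched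
      obtain ⟨B, hB, hBc⟩ := hpre.book
      simp only [Block.contains, Off.sizeof.Codebook] at hBc
      have hsite : Site (Live (stackObjs frames ++ others)) ((e.reg .rdi).toNat + 40) 8 :=
        Site.of_blk hpre.live hB (by omega) (by omega) (by omega)
      exact check_site hpre.shadow.inv (hun.trans hu2) hsite (by u_omega)
    case check_10b460 =>
      -- 10B460H: L4 `codewords + 4·i`, `i < entries`
      have hu2 : ShadowUntouched v.mem s_10b460.mem := by v_untouched
      rw [hEi, hii] at hbr_10b400
      have hB := (hpre.K3t.dense hs).codewords
      have hw := blk_where hpre.live hpre.shadow.inv hpre.shadow.offText (by omega) hB (by simp only []; omega)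
      simp only [] at hw
      have hsite : Site (Live (stackObjs frames ++ others)) (Codebook.codewords e.mem (e.reg .rdi).toNat + 4 * i) 4 :=
        Site.of_blk hpre.live hB (by simp only []; omega) (by simp only []; omega) (by omega)
      exact check_site hpre.shadow.inv (hun.trans hu2) hsite (sext_shl2_add i _ (by omega) (by omega))
    case call_inv => v_inv
    case pre_10b467 =>
      have hu2 : ShadowUntouched v.mem s_10b467.mem := by v_untouched
      exact hpre.shadow.call (hun.trans hu2) (by u_omega) (by u_omega) (by u_omega)
    · -- 10B46CH: bit_reverse has returned
      have hp : s_10b467r.mem = s_10b467.mem := w_post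
      have w_eq := Vorbis.conv_code_eqOn w_code
      have w_df := (show X86.User.abiInv _ from w_inv).1
      have w_mx := (show X86.User.abiInv _ from w_inv).2
      have w_sse := Vorbis.sseOK_of_abiInv w_inv
      have w_mem := hp.trans w_mem_10b467
      obtain ⟨z2, w_rax⟩ : ∃ z2, s_10b467r.reg .rax = z2 := ⟨_, rfl⟩
      clear w_same w_post
      u_walk hcode [hμ.vendor] until [Vorbis.L.compute_sorted_huffman.cut9, Vorbis.L.compute_sorted_huffman.cut11, Vorbis.L.compute_sorted_huffman.cut12] span [Vorbis.L.textLo, Vorbis.L.textHi] side (v_side)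
      -- 10B47DH: the head of the binary search, `x = 0`, `n = se`
      have hst : Mem.SameExcept [⟨(e.reg .rsp).toNat - 336, (e.reg .rsp).toNat - 48⟩] v.mem s_10b477.mem := by u_same
      have hws : ∀ w, w ∈ [Span.mk ((e.reg .rsp).toNat - 336) ((e.reg .rsp).toNat - 48)] → Allowed e w := by
        intro w hw
        rw [List.mem_singleton.mp hw]
        exact Or.inl ⟨Nat.le_refl _, Nat.le_refl _⟩
      have hzv' : ZV s_10b477.mem (Codebook.sorted_values e.mem (e.reg .rdi).toNat)
          (Codebook.sorted_entries e.mem (e.reg .rdi).toNat).toNat (Codebook.entries e.mem (e.reg .rdi).toNat) := by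
        apply hzv.same
        · apply hst.eqOn
          intro w hw
          rw [List.mem_singleton.mp hw]
          simp only []
          omega
        · omega
      have hc' := common_step hcom0 hst hws w_rsp (by rw [w_kept .rbp rfl]; exact hc) w_eq (by v_inv)
        (by u_frame c4) (by u_frame c5) hzv'
      rw [hEi, hii] at hbr_10b400
      have hoff : s_10b477.mem.readLE (e.reg .rsp - 64) 8 =
          (Word.ofBV (BitVec.signExtend 64 (BitVec.ofNat 32 i)) <<< 2).toNat := by
        rw [w_mem]
        u_read
      rw [sext_shl2 i (by omega)] at hoff
      refine ReachVia.done (Or.inr (Or.inr ⟨w_rip, hc', ?_, ?_, ?_, ?_, hoff, w_r12, w_r15, g1, by omega⟩))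
      · rw [hN]
        u_frame c6
      · u_frame c1
      · rw [hN]
        omega
      · rw [hs]
        u_frame c7
    · -- 10B3F3H … 10B3F8H: entry `i` is not included; `++i`, the loop head again
      have hst : Mem.SameExcept [⟨(e.reg .rsp).toNat - 336, (e.reg .rsp).toNat - 48⟩] v.mem s_10b3f3.mem := by u_same
      have hws : ∀ w, w ∈ [Span.mk ((e.reg .rsp).toNat - 336) ((e.reg .rsp).toNat - 48)] → Allowed e w := by
        intro w hw
        rw [List.mem_singleton.mp hw]
        exact Or.inl ⟨Nat.le_refl _, Nat.le_refl _⟩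
      have hzv' : ZV s_10b3f3.mem (Codebook.sorted_values e.mem (e.reg .rdi).toNat)
          (Codebook.sorted_entries e.mem (e.reg .rdi).toNat).toNat (Codebook.entries e.mem (e.reg .rdi).toNat) := by
        apply hzv.same
        · apply hst.eqOn
          intro w hw
          rw [List.mem_singleton.mp hw]
          simp only []
          omega
        · omega
      have hc' := common_step hcom0 hst hws w_rsp (by rw [w_kept .rbp rfl]; exact hc) w_eq (by v_inv)
        (by u_frame c4) (by u_frame c5) hzv'
      rw [hEi, hii] at hbr_10b400
      refine ReachVia.done (Or.inr (Or.inl ⟨⟨w_rip, hc', ?_, ?_, ?_⟩, ?_⟩))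
      · rw [hN]
        u_frame c6
      · rw [w_mem, Mem.readLE_writeLE_same _ _ _ _ (by decide), inc_small i (by omega)]
        omega
      · rw [hN]
        omega
      · rw [hN]
        omega

/-- **One round of the binary search 1238** (10B47DH – 10B4B7H, C lines 1238 – 1246), `n ≥ 2`: the probe `m = x + (n >> 1) < se`
(check 10B49FH, L4 `sorted_codewords + 4·m`), then `x := m, n := n − (n >> 1)` or `n := n >> 1`: BS again with a smaller `n`.
Independent of `c->sparse`. -/
theorem searchStep {Lay : Layout} (hLay : Lay.hi = 0x1000000) {μ : Microarch} (hμ : UserX.MicroOK μ) {u₀ : State}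
    (hcode : HasCodeNat Lay u₀ Vorbis.L.compute_sorted_huffman.entry Vorbis.Code.code_compute_sorted_huffman.nat Vorbis.L.compute_sorted_huffman.size)
    (h_load4 : Asan.SmallCheck Lay μ Vorbis.WayInv (Vorbis.CodeOK u₀) [.rax, .rcx, .rdx] 4 Vorbis.L.__asan_load4_noabort.entry)
    {others : List Obj} {frames : List (Nat × FrameLayout)} {Blk : Block → Prop} {ret : Word} {e v : State} {i x n : Nat}
    (hinv : Search others frames Blk u₀ ret e i x n v) (h2n : 2 ≤ n) :
    ReachVia Lay μ WayInv v (fun v' => ∃ x' n', Search others frames Blk u₀ ret e i x' n' v' ∧ n' < n) := by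
  obtain ⟨hrip, hcom, hlen, hi, hilt, hspb, hoff, b_r12, b_r15, hn1, hbs⟩ := hinv
  have hcom0 := hcom
  obtain ⟨hmid, hpre, hc, hlens, hvals, hfields, hK1, hK2, hK3t, hK4, hzv, hval, hlk⟩ := hcom
  obtain ⟨he, hrsp, hra, h15, h14, h13, h12, hbp, hbx, hsame, hcodeok, habi, hun⟩ := hmid
  v_entry he
  obtain ⟨g1, g2, g3, gbook, glens, gsv, gbsv, glsv⟩ := Geo.of_pre hpre he_room he_top
  have hn31 : n < 2 ^ 31 := by omega
  have r2096 : v.mem.readLE (e.reg .rdi + 2096) 8 = Codebook.sorted_codewords e.mem (e.reg .rdi).toNat :=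
    (readLE_field v.mem (e.reg .rdi) 2096 8).trans hfields.sorted_codewords
  obtain ⟨cd, hcd⟩ : ∃ cd, v.mem.readLE (e.reg .rsp - 96) 4 = cd := ⟨_, rfl⟩
  have hni : (BitVec.ofNat 32 n).toInt = (n : Int) := by
    rw [toInt_of_lt _ (by rw [toNat_ofNat32 _ (by omega)]; omega), toNat_ofNat32 _ (by omega)]
  have h1i : (1#32 : BitVec 32).toInt = 1 := by decide
  have e12 : Word.part .w32 (v.reg .r12) = BitVec.ofNat 32 n := by
    rw [b_r12]
    exact part32_ofBV _
  have hscB := hpre.K4.sc hpre.se_pos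
  have hscW := blk_where hpre.live hpre.shadow.inv hpre.shadow.offText (by omega) hscB (by simp only []; omega)
  simp only [] at hscW
  have hws : ∀ w, w ∈ [Span.mk ((e.reg .rsp).toNat - 336) ((e.reg .rsp).toNat - 48)] → Allowed e w := by
    intro w hw
    rw [List.mem_singleton.mp hw]
    exact Or.inl ⟨Nat.le_refl _, Nat.le_refl _⟩
  have w_rip := hrip
  have w_rsp := hrsp
  have w_rbp := hc
  have w_eq : Mem.EqOn Vorbis.L.textLo Vorbis.L.textHi u₀.mem v.mem := hcodeok
  have hdf : v.flags .df = false := habi.1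
  have hmx : v.mxcsr &&& 0x1F80 = 0x1F80 := habi.2
  have hsse := Vorbis.sseOK_of_abiInv habi
  clear hK1 hK2 hK3t hK4 hval hlk hra h15 h14 h13 h12 hbp hbx hsame glsv
  u_walk hcode [hμ.vendor] until [Vorbis.L.compute_sorted_huffman.cut9, Vorbis.L.compute_sorted_huffman.cut11] span [Vorbis.L.textLo, Vorbis.L.textHi] side (v_side)
  case check_10b49f =>
    -- 10B49FH: L4 `sorted_codewords + 4·m`, `m = x + (n >> 1) < se` by BS
    have hu1 : ShadowUntouched v.mem s_10b49f.mem := by v_untouched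
    have hsite : Site (Live (stackObjs frames ++ others))
        (Codebook.sorted_codewords e.mem (e.reg .rdi).toNat + 4 * (n / 2 + x)) 4 :=
      Site.of_blk hpre.live hscB (by simp only []; omega) (by simp only []; omega) (by omega)
    refine check_site hpre.shadow.inv (hun.trans hu1) hsite ?_
    rw [sar1_small n hn31, lea_small (n / 2) x (by omega)]
    exact sext_shl2_add (n / 2 + x) _ (by omega) (by omega)
  · -- 10B4B7H: `sorted_codewords[m] ≤ code`: `x := m`, `n := n − (n >> 1)`
    rw [sar1_small n hn31, sub_small n hn31] at w_r12
    rw [sar1_small n hn31, lea_small (n / 2) x (by omega)] at w_r15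
    have hst : Mem.SameExcept [⟨(e.reg .rsp).toNat - 336, (e.reg .rsp).toNat - 48⟩] v.mem s_10b4b7.mem := by u_same
    have hzv' : ZV s_10b4b7.mem (Codebook.sorted_values e.mem (e.reg .rdi).toNat)
        (Codebook.sorted_entries e.mem (e.reg .rdi).toNat).toNat (Codebook.entries e.mem (e.reg .rdi).toNat) := by
      apply hzv.same
      · apply hst.eqOn
        intro w hw
        rw [List.mem_singleton.mp hw]
        simp only []
        omega
      · omega
    have hc' := common_step hcom0 hst hws w_rsp (by rw [w_kept .rbp rfl]; exact hc)
      w_eq (by v_inv) (by u_frame hlens) (by u_frame hvals) hzv'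
    refine ReachVia.done ⟨n / 2 + x, n - n / 2, ⟨w_rip, hc', ?_, ?_, hilt, ?_, ?_, w_r12, w_r15, by omega, by omega⟩, by omega⟩
    · u_frame hlen
    · u_frame hi
    · u_frame hspb
    · u_frame hoff
  · -- 10B4AFH: `code < sorted_codewords[m]`: `n := n >> 1`
    rw [sar1_small n hn31] at w_r12
    have hst : Mem.SameExcept [⟨(e.reg .rsp).toNat - 336, (e.reg .rsp).toNat - 48⟩] v.mem s_10b4af.mem := by u_same
    have hzv' : ZV s_10b4af.mem (Codebook.sorted_values e.mem (e.reg .rdi).toNat)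
        (Codebook.sorted_entries e.mem (e.reg .rdi).toNat).toNat (Codebook.entries e.mem (e.reg .rdi).toNat) := by
      apply hzv.same
      · apply hst.eqOn
        intro w hw
        rw [List.mem_singleton.mp hw]
        simp only []
        omega
      · omega
    have hc' := common_step hcom0 hst hws w_rsp (by rw [w_kept .rbp rfl]; exact hc)
      w_eq (by v_inv) (by u_frame hlens) (by u_frame hvals) hzv'
    refine ReachVia.done ⟨x, n / 2, ⟨w_rip, hc', ?_, ?_, hilt, ?_, ?_, w_r12, ?_, by omega, by omega⟩, by omega⟩
    · u_frame hlen
    · u_frame hi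
    · u_frame hspb
    · u_frame hoff
    · rw [w_kept .r15 rfl]
      exact b_r15

/-- **The end of a round of loop 1233, a dense book** (10B47DH with `n = 1`, 10B4B9H, 10B523H – 10B54CH, 10B3F3H; C lines 1249,
1253): the search is over with `0 ≤ x < se` (BS), `c->sorted_values[x] = i` (checks 10B52AH L8 `c + 838H`, 10B540H S4
`sorted_values + 4·x`; the stored value `i < len = entries` keeps ZV), `++i`, the head `cut9` again. -/
theorem storeDense {Lay : Layout} (hLay : Lay.hi = 0x1000000) {μ : Microarch} (hμ : UserX.MicroOK μ) {u₀ : State}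
    (hcode : HasCodeNat Lay u₀ Vorbis.L.compute_sorted_huffman.entry Vorbis.Code.code_compute_sorted_huffman.nat Vorbis.L.compute_sorted_huffman.size)
    (h_load8 : Asan.SmallCheck Lay μ Vorbis.WayInv (Vorbis.CodeOK u₀) [.rax, .rcx, .rdx] 8 Vorbis.L.__asan_load8_noabort.entry)
    (h_store4 : Asan.SmallCheck Lay μ Vorbis.WayInv (Vorbis.CodeOK u₀) [.rax, .rcx, .rdx] 4 Vorbis.L.__asan_store4_noabort.entry)
    {others : List Obj} {frames : List (Nat × FrameLayout)} {Blk : Block → Prop} {ret : Word} {e v : State} {i x n : Nat}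
    (hinv : Search others frames Blk u₀ ret e i x n v) (hn : n ≤ 1) (hs : Codebook.sparse e.mem (e.reg .rdi).toNat = 0) :
    ReachVia Lay μ WayInv v (fun v' => Next others frames Blk u₀ ret e i v') := by
  obtain ⟨hrip, hcom, hlen, hi, hilt, hspb, hoff, b_r12, b_r15, hn1, hbs⟩ := hinv
  have hcom0 := hcom
  obtain ⟨hmid, hpre, hc, hlens, hvals, hfields, hK1, hK2, hK3t, hK4, hzv, hval, hlk⟩ := hcom
  obtain ⟨he, hrsp, hra, h15, h14, h13, h12, hbp, hbx, hsame, hcodeok, habi, hun⟩ := hmid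
  v_entry he
  obtain ⟨g1, g2, g3, gbook, glens, gsv, gbsv, glsv⟩ := Geo.of_pre hpre he_room he_top
  have hN : Codebook.N e.mem (e.reg .rdi).toNat = Codebook.entries e.mem (e.reg .rdi).toNat := Codebook.N_dense hs
  rw [hs] at hspb
  have k1 := hpre.K1.ent_nonneg
  have hiE : i < (Codebook.entries e.mem (e.reg .rdi).toNat).toNat := by
    rw [hN] at hilt
    omega
  have r2104 : v.mem.readLE (e.reg .rdi + 2104) 8 = Codebook.sorted_values e.mem (e.reg .rdi).toNat :=
    (readLE_field v.mem (e.reg .rdi) 2104 8).trans hfields.sorted_values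
  have hni : (BitVec.ofNat 32 n).toInt = (n : Int) := by
    rw [toInt_of_lt _ (by rw [toNat_ofNat32 _ (by omega)]; omega), toNat_ofNat32 _ (by omega)]
  have h1i : (1#32 : BitVec 32).toInt = 1 := by decide
  have e12 : Word.part .w32 (v.reg .r12) = BitVec.ofNat 32 n := by
    rw [b_r12]
    exact part32_ofBV _
  have e15 : Word.part .w32 (v.reg .r15) = BitVec.ofNat 32 x := by
    rw [b_r15]
    exact part32_ofBV _
  have hax := sext_shl2_add x (Codebook.sorted_values e.mem (e.reg .rdi).toNat) (by omega) (by omega)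
  have hinc := inc_small i (by omega)
  have w_rip := hrip
  have w_rsp := hrsp
  have w_rbp := hc
  have w_eq : Mem.EqOn Vorbis.L.textLo Vorbis.L.textHi u₀.mem v.mem := hcodeok
  have hdf : v.flags .df = false := habi.1
  have hmx : v.mxcsr &&& 0x1F80 = 0x1F80 := habi.2
  have hsse := Vorbis.sseOK_of_abiInv habi
  clear hK1 hK2 hK3t hK4 hval hlk hra h15 h14 h13 h12 hbp hbx hsame glsv
  u_walk hcode [hμ.vendor] until [Vorbis.L.compute_sorted_huffman.cut9, Vorbis.L.compute_sorted_huffman.cut11] span [Vorbis.L.textLo, Vorbis.L.textHi] side (v_side)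
  case check_10b52a =>
    -- 10B52AH: L8 `c + 838H`, a field of the struct
    have hu1 : ShadowUntouched v.mem s_10b52a.mem := by v_untouched
    obtain ⟨B, hB, hBc⟩ := hpre.book
    simp only [Block.contains, Off.sizeof.Codebook] at hBc
    have hsite : Site (Live (stackObjs frames ++ others)) ((e.reg .rdi).toNat + 2104) 8 :=
      Site.of_blk hpre.live hB (by omega) (by omega) (by omega)
    exact check_site hpre.shadow.inv (hun.trans hu1) hsite (by u_omega)
  case check_10b540 =>
    -- 10B540H: S4 `sorted_values + 4·x`, `x < se` by BS: inside the `sorted_values` block (after its sentinel word)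
    have hu1 : ShadowUntouched v.mem s_10b540.mem := by v_untouched
    have hsite : Site (Live (stackObjs frames ++ others))
        (Codebook.sorted_values e.mem (e.reg .rdi).toNat + 4 * x) 4 :=
      Site.of_blk hpre.live (hpre.K4.sv hpre.se_pos) (by simp only []; omega) (by simp only []; omega) (by omega)
    exact check_site hpre.shadow.inv (hun.trans hu1) hsite hax
  -- 10B3F8H: the loop head again, `i + 1`
  have hst : Mem.SameExcept [⟨(e.reg .rsp).toNat - 336, (e.reg .rsp).toNat - 48⟩,
      ⟨Codebook.sorted_values e.mem (e.reg .rdi).toNat + 4 * x,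
        Codebook.sorted_values e.mem (e.reg .rdi).toNat + 4 * x + 4⟩] v.mem s_10b3f3.mem := by u_same
  have hws : ∀ w, w ∈ [Span.mk ((e.reg .rsp).toNat - 336) ((e.reg .rsp).toNat - 48),
      Span.mk (Codebook.sorted_values e.mem (e.reg .rdi).toNat + 4 * x)
        (Codebook.sorted_values e.mem (e.reg .rdi).toNat + 4 * x + 4)] → Allowed e w := by
    intro w hw
    rcases List.mem_cons.mp hw with h | h
    · rw [h]
      exact Or.inl ⟨Nat.le_refl _, Nat.le_refl _⟩
    · rw [List.mem_singleton.mp h]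
      refine Or.inr (Or.inl ⟨?_, ?_⟩)
      · simp only []
        omega
      · simp only []
        omega
  have hrd : s_10b3f3.mem.readLE (Word.ofBV (BitVec.signExtend 64 (BitVec.ofNat 32 x)) <<< 2 +
      UInt64.ofNat (Codebook.sorted_values e.mem (e.reg .rdi).toNat)) 4 = (BitVec.ofNat 32 i).toNat := by
    rw [w_mem]
    u_read
  have hA := eq_addr _ _ hax
  have hv : s_10b3f3.mem.i32 (Codebook.sorted_values e.mem (e.reg .rdi).toNat + 4 * x) = (i : Int) := by
    rw [Mem.i32_def]
    show sint32 (s_10b3f3.mem.readLE (addr (Codebook.sorted_values e.mem (e.reg .rdi).toNat + 4 * x)) 4) = _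
    rw [← hA, hrd, toNat_ofNat32 i (by omega)]
    unfold sint32
    rw [if_pos (by omega)]
  have hzv' : ZV s_10b3f3.mem (Codebook.sorted_values e.mem (e.reg .rdi).toNat)
      (Codebook.sorted_entries e.mem (e.reg .rdi).toNat).toNat (Codebook.entries e.mem (e.reg .rdi).toNat) := by
    apply hzv.store (x := x) (by omega)
    · apply hst.eqOn
      intro w hw
      rcases List.mem_cons.mp hw with h | h
      · rw [h]
        simp only []
        omega
      · rw [List.mem_singleton.mp h]
        simp only []
        omega
    · apply hst.eqOn
      intro w hw
      rcases List.mem_cons.mp hw with h | h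
      · rw [h]
        simp only []
        omega
      · rw [List.mem_singleton.mp h]
        simp only []
        omega
    · omega
    · rw [hv]
      omega
  have hc' := common_step hcom0 hst hws w_rsp (by rw [w_kept .rbp rfl]; exact hc) w_eq (by v_inv)
    (by u_frame hlens) (by u_frame hvals) hzv'
  refine ReachVia.done ⟨⟨w_rip, hc', ?_, ?_, ?_⟩, hilt⟩
  · u_frame hlen
  · rw [w_mem, Mem.readLE_writeLE_same _ _ _ _ (by decide), hinc]
    omega
  · omega

end Vorbis.Spec.compute_sorted_huffman_3
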